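-- pv_equiv track=rewrite | github.com/JaINTP/artifacts-tui | sentient_artifacts/tui/widgets/crafting_demand_panel/formatting.py | primary_actor
-- ===== SOURCE A (Python) =====
-- from collections.abc import Mapping
-- from typing import Any
--
-- def primary_actor(mapping: Mapping[str, Any] | None, fallback: str) -> str:
--     """Return the top-ranked actor name from a mapping."""
--     if not isinstance(mapping, dict) or not mapping:
--         return fallback
--     ranked = sorted(
--         ((str(name), int(qty or 0)) for name, qty in mapping.items()),
--         key=lambda item: (-item[1], item[0]),
--     )
--     return ranked[0][0]
-- ===== SOURCE B (Python) =====
-- def primary_actor(mapping, fallback):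
--     """Return the top-ranked actor name from a mapping (single pass, no sort)."""
--     if not isinstance(mapping, dict) or not mapping:
--         return fallback
--     items = iter(mapping.items())
--     name, qty = next(items)
--     best_name, best_qty = str(name), int(qty or 0)
--     for name, qty in items:
--         n, q = str(name), int(qty or 0)
--         if q > best_qty or (q == best_qty and n < best_name):
--             best_name, best_qty = n, q
--     return best_name
-- ===== Notes on version B (the rewrite author's own statement) =====
-- stated objective: alternative
-- what changed: Replaces sorting the whole item list by (-qty, name) and taking the first element with a single running-argmax pass that keeps the best (qty, name) seen so far; O(n) scan instead of building a full sorted order.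
import Mathlib
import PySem

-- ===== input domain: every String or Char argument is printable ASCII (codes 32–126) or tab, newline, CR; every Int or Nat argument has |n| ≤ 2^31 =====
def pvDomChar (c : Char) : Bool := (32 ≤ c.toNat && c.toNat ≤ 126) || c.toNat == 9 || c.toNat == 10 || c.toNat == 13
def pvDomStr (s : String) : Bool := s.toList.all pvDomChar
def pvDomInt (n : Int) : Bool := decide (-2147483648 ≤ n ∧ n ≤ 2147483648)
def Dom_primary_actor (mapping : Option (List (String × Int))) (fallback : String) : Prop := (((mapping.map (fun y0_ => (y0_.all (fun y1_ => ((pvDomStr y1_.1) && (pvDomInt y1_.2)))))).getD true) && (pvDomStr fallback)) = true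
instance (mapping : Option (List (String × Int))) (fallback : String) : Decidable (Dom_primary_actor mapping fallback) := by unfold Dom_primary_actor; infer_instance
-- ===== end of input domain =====

-- B replaces A's full sort by (-qty, name) with a single running-argmax pass over the items.


-- ===== PORT A =====
-- sorted(((str(name), int(qty or 0)) for …), key=lambda item: (-item[1], item[0]))[0][0]
def primary_actor (mapping : Option (List (String × Int))) (fallback : String) : String :=
  match mapping with
  | none => fallback
  | some m =>
    if m = [] then fallback
    else
      let ranked := PySem.List.sorted2
        (m.map (fun p => (p.1, if p.2 ≠ 0 then p.2 else 0)))
        (fun item => -item.2) (fun item => item.1)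
      (PySem.List.pyGetD ranked 0 ("", 0)).1

-- ===== PORT B =====
-- one pass: start from the first converted entry, update on (q > best_q) or (q = best_q and n < best_n)
def primary_actor_alt (mapping : Option (List (String × Int))) (fallback : String) : String :=
  match mapping with
  | none => fallback
  | some [] => fallback
  | some ((name, qty) :: rest) =>
    (rest.foldl
      (fun best p =>
        let n := p.1
        let q := if p.2 ≠ 0 then p.2 else 0
        if q > best.2 ∨ (q = best.2 ∧ n < best.1) then (n, q) else best)
      (name, if qty ≠ 0 then qty else 0)).1

-- ===== PRECONDITION & SPEC =====
def Spec_primary_actor (mapping : Option (List (String × Int))) (fallback : String) (out : String) : Prop := out = primary_actor_alt mapping fallback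
instance (mapping : Option (List (String × Int))) (fallback : String) (out : String) : Decidable (Spec_primary_actor mapping fallback out) := by unfold Spec_primary_actor; infer_instance

-- ===== CLAIM (what is proved, stated in full; the proofs are below) =====
def Claim_equal_primary_actor : Prop := ∀ (mapping : Option (List (String × Int))) (fallback : String), Dom_primary_actor mapping fallback → Spec_primary_actor mapping fallback (primary_actor mapping fallback)

-- ===== LEMMAS AND PROOFS =====

-- `qty or 0` is the identity on Int
theorem ifZero_eq (q : Int) : (if q ≠ 0 then q else 0) = q := by
  split <;> omega

theorem pair_ifZero_eq (p : String × Int) : (p.1, if p.2 ≠ 0 then p.2 else 0) = p := by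
  rw [ifZero_eq]

-- insertBy never produces []
theorem insertBy_ne_nil {α : Type} (before : α → α → Bool) (x : α) (l : List α) :
    PySem.List.insertBy before x l ≠ [] := by
  cases l with
  | nil => simp [PySem.List.insertBy]
  | cons y ys => simp only [PySem.List.insertBy]; split <;> simp

-- head of an insertion is decided by one comparison with the old head
theorem headD_insertBy {α : Type} (before : α → α → Bool) (x y : α) (ys : List α) (d : α) :
    (PySem.List.insertBy before x (y :: ys)).headD d = if before x y then x else y := by
  simp only [PySem.List.insertBy]; split <;> rfl

-- the head of the insertion-sort fold is the running strict-minimum of the inputs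
theorem headD_foldl_insertBy {α : Type} (before : α → α → Bool) (d : α) :
    ∀ (xs : List α) (acc : List α), acc ≠ [] →
      (xs.foldl (fun acc x => PySem.List.insertBy before x acc) acc).headD d =
      xs.foldl (fun b x => if before x b then x else b) (acc.headD d) := by
  intro xs
  induction xs with
  | nil => intro acc _; rfl
  | cons x t ih =>
    intro acc hacc
    cases acc with
    | nil => exact absurd rfl hacc
    | cons y ys =>
      simp only [List.foldl_cons]
      rw [ih _ (insertBy_ne_nil before x (y :: ys)), headD_insertBy]
      rfl

-- pyGetD at index 0 is headD
theorem pyGetD_zero {α : Type} (xs : List α) (d : α) :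
    PySem.List.pyGetD xs 0 d = xs.headD d := by
  cases xs <;> simp [pysem, PySem.List.pyGetD, PySem.List.pyGet?, PySem.List.pyIdx?]

-- A's sorted2 comparison agrees with B's update test
theorem before_iff (a b : String × Int) :
    (decide (-a.2 < -b.2) || (!decide (-b.2 < -a.2) && decide (a.1 < b.1))) =
    decide (a.2 > b.2 ∨ (a.2 = b.2 ∧ a.1 < b.1)) := by
  by_cases h1 : b.2 < a.2
  · simp [h1, (by omega : -a.2 < -b.2)]
  · by_cases h2 : a.2 < b.2
    · simp [(by omega : -b.2 < -a.2), h1]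
      intro heq; omega
    · have he : a.2 = b.2 := by omega
      simp [he, h1, lt_irrefl]

-- ===== VERDICT (by name: the statement is the Claim_ definition above) =====
theorem primary_actor_spec : Claim_equal_primary_actor := by
  intro mapping fallback _
  unfold Spec_primary_actor primary_actor primary_actor_alt
  match mapping with
  | none => rfl
  | some [] => rfl
  | some ((name, qty) :: rest) =>
    simp only [List.map_cons, reduceCtorEq, PySem.List.sorted2, List.foldl_cons,
      if_false, reduceIte]
    rw [pyGetD_zero,
        headD_foldl_insertBy _ _ _ _ (insertBy_ne_nil _ _ [])]
    simp only [PySem.List.insertBy, List.headD_cons, pair_ifZero_eq]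
    congr 1
    rw [List.foldl_map]
    apply PySem.List.foldl_congr_mem
    intro b p _
    simp only [ifZero_eq, before_iff p b]
    by_cases h : p.2 > b.2 ∨ (p.2 = b.2 ∧ p.1 < b.1) <;> simp [h, pair_ifZero_eq]
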